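-- pv_equiv track=rewrite | github.com/salonxix/Python_100-days-streak | find_the_max_length_of_valid_subsequence_II.py | longestValidSubsequence
-- ===== SOURCE A (Python) =====
-- def longestValidSubsequence(nums):
--     # Case 1: all-same-parity subsequence (even‑sum pairs)
--     count_even = sum(1 for x in nums if x % 2 == 0)
--     count_odd  = len(nums) - count_even
--     best_same = max(count_even, count_odd)
--
--     # Case 2: alternating-parity subsequence (odd‑sum pairs)
--     def alternating_length(start_parity):
--         length = 0
--         expected = start_parity
--         for x in nums:
--             if x % 2 == expected:
--                 length += 1
--                 expected ^= 1  # flip expectation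
--         return length
--
--     best_alt = max(alternating_length(0), alternating_length(1))
--
--     return max(best_same, best_alt)
-- ===== SOURCE B (Python) =====
-- def longestValidSubsequence(nums):
--     # Parity counts for the all-same-parity case, counting odds directly.
--     odd = 0
--     for x in nums:
--         odd += x % 2
--     best_same = max(odd, len(nums) - odd)
--
--     # Alternating-parity case in ONE pass: the longest alternating-parity
--     # subsequence has length (number of adjacent parity changes) + 1.
--     changes = 0
--     for a, b in zip(nums, nums[1:]):
--         if a % 2 != b % 2:
--             changes += 1
--     best_alt = 0 if not nums else changes + 1
--
--     return max(best_same, best_alt)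
-- ===== Notes on version B (the rewrite author's own statement) =====
-- stated objective: simpler
-- what changed: The two greedy alternating scans (one per start parity) are replaced by a single pass counting adjacent parity changes, using the identity that the longest alternating-parity subsequence has length (changes + 1) for nonempty input; odds are counted directly instead of evens.
import Mathlib
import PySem

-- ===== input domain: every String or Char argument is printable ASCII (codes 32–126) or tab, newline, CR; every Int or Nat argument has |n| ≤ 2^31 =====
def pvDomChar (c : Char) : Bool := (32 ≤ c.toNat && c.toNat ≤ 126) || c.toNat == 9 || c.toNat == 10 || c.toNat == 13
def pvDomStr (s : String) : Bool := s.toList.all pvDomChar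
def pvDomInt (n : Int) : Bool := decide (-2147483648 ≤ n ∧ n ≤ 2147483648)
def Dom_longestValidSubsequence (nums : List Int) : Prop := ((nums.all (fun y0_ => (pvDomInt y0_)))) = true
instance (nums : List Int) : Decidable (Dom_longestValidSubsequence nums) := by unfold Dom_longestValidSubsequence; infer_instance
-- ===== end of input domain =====

-- B replaces A's two greedy alternating scans with one adjacent-parity-change count (simpler, one fewer pass); return values agree on all inputs.

-- ===== PORT A =====
-- count_even = sum(1 for x in nums if x % 2 == 0)
def pvCountEven (nums : List Int) : Int :=
  nums.foldl (fun acc x => if PySem.Int.mod x 2 == 0 then acc + 1 else acc) 0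

-- the for-loop of alternating_length, state (length, expected); 'expected ^= 1' is Python int xor
def pvAltGo : List Int → Int → Int → Int
  | [], length, _ => length
  | x :: xs, length, expected =>
    if PySem.Int.mod x 2 == expected then pvAltGo xs (length + 1) (PySem.Int.bxor expected 1)
    else pvAltGo xs length expected

def pvAlternatingLength (nums : List Int) (startParity : Int) : Int :=
  pvAltGo nums 0 startParity

def longestValidSubsequence (nums : List Int) : Int :=
  let countEven := pvCountEven nums
  let countOdd := (nums.length : Int) - countEven
  let bestSame := max countEven countOdd
  let bestAlt := max (pvAlternatingLength nums 0) (pvAlternatingLength nums 1)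
  max bestSame bestAlt

-- ===== PORT B =====
def longestValidSubsequence_alt (nums : List Int) : Int :=
  let odd := nums.foldl (fun acc x => acc + PySem.Int.mod x 2) 0
  let bestSame := max odd ((nums.length : Int) - odd)
  -- zip(nums, nums[1:]); nums[1:] = drop 1 (exact: nonnegative start, open end)
  let changes := ((nums.zip (nums.drop 1)).foldl
    (fun c p => if PySem.Int.mod p.1 2 ≠ PySem.Int.mod p.2 2 then c + 1 else c) 0)
  let bestAlt : Int := if nums = [] then 0 else changes + 1
  max bestSame bestAlt

-- ===== PRECONDITION & SPEC =====
def Spec_longestValidSubsequence (nums : List Int) (out : Int) : Prop := out = longestValidSubsequence_alt nums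
instance (nums : List Int) (out : Int) : Decidable (Spec_longestValidSubsequence nums out) := by unfold Spec_longestValidSubsequence; infer_instance

-- ===== CLAIM (what is proved, stated in full; the proofs are below) =====
def Claim_equal_longestValidSubsequence : Prop := ∀ (nums : List Int), Dom_longestValidSubsequence nums → Spec_longestValidSubsequence nums (longestValidSubsequence nums)

-- ===== LEMMAS AND PROOFS =====

lemma pvMod2 (x : Int) : PySem.Int.mod x 2 = 0 ∨ PySem.Int.mod x 2 = 1 := by
  have h1 : 0 ≤ PySem.Int.mod x 2 := PySem.Int.mod_nonneg x (by omega)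
  have h2 : PySem.Int.mod x 2 < 2 := PySem.Int.mod_lt x (by omega)
  omega

lemma pvBxor01 : PySem.Int.bxor 0 1 = 1 := by decide
lemma pvBxor11 : PySem.Int.bxor 1 1 = 0 := by decide

-- recursive form of B's change-count
def pvChg : List Int → Int
  | x :: y :: t => (if PySem.Int.mod x 2 ≠ PySem.Int.mod y 2 then 1 else 0) + pvChg (y :: t)
  | _ => 0

lemma pvChg_cons (x y : Int) (t : List Int) :
    pvChg (x :: y :: t) = (if PySem.Int.mod x 2 ≠ PySem.Int.mod y 2 then 1 else 0) + pvChg (y :: t) := rfl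

lemma pvAltGo_cons (x : Int) (xs : List Int) (len e : Int) :
    pvAltGo (x :: xs) len e =
      if PySem.Int.mod x 2 == e then pvAltGo xs (len + 1) (PySem.Int.bxor e 1)
      else pvAltGo xs len e := rfl

lemma pvChg_nonneg : ∀ xs, 0 ≤ pvChg xs := by
  intro xs
  induction xs with
  | nil => simp [pvChg]
  | cons x xs ih =>
    cases xs with
    | nil => simp [pvChg]
    | cons y t =>
      simp only [pvChg] at *
      split <;> omega

lemma pvChg_foldl : ∀ (xs : List Int) (c : Int),
    (xs.zip (xs.drop 1)).foldl
      (fun c p => if PySem.Int.mod p.1 2 ≠ PySem.Int.mod p.2 2 then c + 1 else c) c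
      = c + pvChg xs := by
  intro xs
  induction xs with
  | nil => intro c; simp [pvChg]
  | cons x xs ih =>
    intro c
    cases xs with
    | nil => simp [pvChg]
    | cons y t =>
      simp only [List.drop, List.zip_cons_cons, List.foldl_cons, pvChg]
      have h := ih (c := if PySem.Int.mod x 2 ≠ PySem.Int.mod y 2 then c + 1 else c)
      simp only [List.drop] at h ⊢
      rw [h]
      split <;> omega

lemma pvAltGo_acc : ∀ (xs : List Int) (len e : Int),
    pvAltGo xs len e = len + pvAltGo xs 0 e := by
  intro xs
  induction xs with
  | nil => intro len e; simp [pvAltGo]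
  | cons x xs ih =>
    intro len e
    simp only [pvAltGo]
    split
    · rw [ih (len + 1), ih (0 + 1)]; ring
    · exact ih len e

lemma pvAlt_main : ∀ (xs : List Int) (x : Int),
    pvAltGo (x :: xs) 0 (PySem.Int.mod x 2) = 1 + pvChg (x :: xs)
    ∧ pvAltGo (x :: xs) 0 (1 - PySem.Int.mod x 2) = pvChg (x :: xs) := by
  intro xs
  induction xs with
  | nil =>
    intro x
    rcases pvMod2 x with h | h <;>
      (constructor <;> (simp only [pvAltGo, pvChg, h]; norm_num))
  | cons y t ih =>
    intro x
    have ih1 := (ih y).1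
    have ih2 := (ih y).2
    rcases pvMod2 x with hx | hx <;> rcases pvMod2 y with hy | hy <;>
      rw [hy] at ih1 ih2 <;> norm_num at ih2 <;>
      (constructor <;>
        · rw [pvAltGo_cons, pvChg_cons, hx, hy]
          norm_num [pvBxor01, pvBxor11]
          try rw [pvAltGo_acc _ 1]
          omega)

lemma pvCount_sum : ∀ (xs : List Int) (c d : Int),
    xs.foldl (fun acc x => if PySem.Int.mod x 2 == 0 then acc + 1 else acc) c
      + xs.foldl (fun acc x => acc + PySem.Int.mod x 2) d
      = c + d + (xs.length : Int) := by
  intro xs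
  induction xs with
  | nil => intro c d; simp
  | cons x xs ih =>
    intro c d
    simp only [List.foldl_cons, List.length_cons]
    rw [ih]
    rcases pvMod2 x with h | h <;> rw [h] <;>
      (norm_num; omega)

-- ===== VERDICT (by name: the statement is the Claim_ definition above) =====
theorem longestValidSubsequence_spec : Claim_equal_longestValidSubsequence := by
  intro nums _
  unfold Spec_longestValidSubsequence longestValidSubsequence longestValidSubsequence_alt
        pvAlternatingLength pvCountEven
  dsimp only
  rw [pvChg_foldl]
  cases nums with
  | nil => simp [pvAltGo]
  | cons x xs =>
    have hcnt := pvCount_sum (x :: xs) 0 0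
    have hC := pvChg_nonneg (x :: xs)
    have h1 := (pvAlt_main xs x).1
    have h0 := (pvAlt_main xs x).2
    rw [if_neg (List.cons_ne_nil x xs)]
    rcases pvMod2 x with h | h <;> rw [h] at h1 h0 <;> norm_num at h0 <;>
      · rw [h1, h0]
        simp only [max_def]
        split_ifs <;> omega
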